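-- pv_equiv track=rewrite | github.com/t3dy/ReapNES | tools/mdb/instrument_extractor.py | _detect_loop_point
-- ===== SOURCE A (Python) =====
-- from typing import Optional
--
-- def _detect_loop_point(envelope: list[int], min_sustain: int = 4) -> Optional[int]:
--     """Detect a sustain loop point in an envelope.
--
--     Heuristic: find the longest run of a constant value after the
--     attack phase. The loop point is the start of that run.
--
--     Args:
--         envelope: List of envelope values.
--         min_sustain: Minimum run length to qualify as sustain.
--
--     Returns:
--         Frame index of loop start, or None if no sustain detected.
--     """
--     if len(envelope) < min_sustain + 2:
--         return None
--
--     best_start = None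
--     best_len = 0
--     run_start = 0
--     run_len = 1
--
--     for i in range(1, len(envelope)):
--         if envelope[i] == envelope[i - 1]:
--             run_len += 1
--         else:
--             if run_len >= min_sustain and run_len > best_len:
--                 best_start = run_start
--                 best_len = run_len
--             run_start = i
--             run_len = 1
--
--     # Check final run
--     if run_len >= min_sustain and run_len > best_len:
--         best_start = run_start
--
--     return best_start
-- ===== SOURCE B (Python) =====
-- from typing import Optional
--
-- def _detect_loop_point(envelope: list[int], min_sustain: int = 4) -> Optional[int]:
--     if len(envelope) < min_sustain + 2:
--         return None
--     n = len(envelope)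
--     bounds = [0] + [i for i in range(1, n) if envelope[i] != envelope[i - 1]] + [n]
--     runs = [(s, e - s) for s, e in zip(bounds, bounds[1:])]
--     best = max((r for r in runs if r[1] >= min_sustain), key=lambda r: r[1], default=None)
--     return None if best is None else best[0]
-- ===== Notes on version B (the rewrite author's own statement) =====
-- stated objective: alternative
-- what changed: Replaces A's single-pass stateful run-length scan (adjacent-element comparison with best_start/best_len/run_start/run_len accumulators and a trailing-run flush) by staged passes with no best-tracking loop: a comprehension collects run boundary indices, zip of the boundary list with its own tail yields (start,length) runs, a filter keeps qualifying runs, and the builtin max(key=length, default=None) picks the first longest run.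
import Mathlib
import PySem

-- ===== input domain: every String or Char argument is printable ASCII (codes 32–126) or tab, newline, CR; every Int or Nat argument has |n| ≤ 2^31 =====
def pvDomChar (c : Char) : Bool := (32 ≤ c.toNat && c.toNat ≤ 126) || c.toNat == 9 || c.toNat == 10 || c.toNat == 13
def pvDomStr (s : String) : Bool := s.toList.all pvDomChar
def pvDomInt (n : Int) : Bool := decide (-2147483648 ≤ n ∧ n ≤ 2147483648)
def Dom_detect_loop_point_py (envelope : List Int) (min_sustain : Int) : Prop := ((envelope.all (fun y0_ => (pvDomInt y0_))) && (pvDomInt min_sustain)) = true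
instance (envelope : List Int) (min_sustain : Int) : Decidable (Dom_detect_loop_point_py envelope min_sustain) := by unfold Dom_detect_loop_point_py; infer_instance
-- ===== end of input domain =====

-- B replaces A's single-pass stateful run-length scan by staged passes: boundary indices via a
-- comprehension, zip-with-tail into (start,length) runs, filter, then max(key=length, default=None).


-- ===== PORT A =====
-- A's loop body: compare envelope[i] with envelope[i-1]; same → extend run, else commit & reset
def pvStepA (envelope : List Int) (m : Int) (s : Option Int × Int × Int × Int) (i : Int) : Option Int × Int × Int × Int :=
  let (best_start, best_len, run_start, run_len) := s
  if (PySem.List.pyGet? envelope i).getD 0 = (PySem.List.pyGet? envelope (i - 1)).getD 0 then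
    (best_start, best_len, run_start, run_len + 1)
  else
    let (best_start, best_len) :=
      if run_len ≥ m ∧ run_len > best_len then (some run_start, run_len)
      else (best_start, best_len)
    (best_start, best_len, i, (1 : Int))

-- A's final-run check after the loop
def pvFlush (m : Int) : (Option Int × Int × Int × Int) → Option Int
  | (best_start, best_len, run_start, run_len) =>
    if run_len ≥ m ∧ run_len > best_len then some run_start else best_start

-- literal transliteration of A: for i in range(1, len(envelope)), then the final-run check
def detect_loop_point_py (envelope : List Int) (min_sustain : Int) : Option Int :=
  if (envelope.length : Int) < min_sustain + 2 then none
  else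
    pvFlush min_sustain
      ((PySem.List.pyRange 1 (envelope.length : Int) 1).foldl
        (pvStepA envelope min_sustain) (none, 0, 0, 1))

-- ===== PORT B =====
-- transliteration of B's staged passes: boundary comprehension, zip into runs, filter, max(key, default=None)
def detect_loop_point_py_alt (envelope : List Int) (min_sustain : Int) : Option Int :=
  if (envelope.length : Int) < min_sustain + 2 then none
  else
    let n : Int := envelope.length
    let bounds : List Int :=
      0 :: ((PySem.List.pyRange 1 n 1).filter
        (fun i => decide ((PySem.List.pyGet? envelope i).getD 0 ≠ (PySem.List.pyGet? envelope (i - 1)).getD 0)) ++ [n])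
    let runs : List (Int × Int) := (bounds.zip (bounds.drop 1)).map (fun p => (p.1, p.2 - p.1))
    match PySem.List.max? (runs.filter (fun r => decide (r.2 ≥ min_sustain))) (fun r => r.2) with
    | none => none
    | some b => some b.1

-- ===== PRECONDITION & SPEC =====
def Spec_detect_loop_point_py (envelope : List Int) (min_sustain : Int) (out : Option Int) : Prop := out = detect_loop_point_py_alt envelope min_sustain
instance (envelope : List Int) (min_sustain : Int) (out : Option Int) : Decidable (Spec_detect_loop_point_py envelope min_sustain out) := by unfold Spec_detect_loop_point_py; infer_instance

-- ===== CLAIM (what is proved, stated in full; the proofs are below) =====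
def Claim_equal_detect_loop_point_py : Prop := ∀ (envelope : List Int) (min_sustain : Int), Dom_detect_loop_point_py envelope min_sustain → Spec_detect_loop_point_py envelope min_sustain (detect_loop_point_py envelope min_sustain)

-- ===== LEMMAS AND PROOFS =====

-- boundary indices of the run decomposition, as structural recursion carrying the previous value
def pvBnd (prev : Int) : List Int → Int → List Int
  | [], _ => []
  | x :: xs, i => if x = prev then pvBnd x xs (i + 1) else i :: pvBnd x xs (i + 1)

-- (start, length) runs as structural recursion
def pvRunsAux (prev s cnt : Int) : List Int → List (Int × Int)
  | [] => [(s, cnt)]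
  | x :: xs => if x = prev then pvRunsAux prev s (cnt + 1) xs else (s, cnt) :: pvRunsAux x (s + cnt) 1 xs

-- A's index loop rephrased as structural recursion on the tail, carrying the previous value
def pvLoopA (m : Int) (prev : Int) : List Int → (Option Int × Int × Int × Int) → (Option Int × Int × Int × Int)
  | [], s => s
  | x :: xs, (bs, bl, rs, rl) =>
    if x = prev then pvLoopA m x xs (bs, bl, rs, rl + 1)
    else
      let (bs', bl') := if rl ≥ m ∧ rl > bl then (some rs, rl) else (bs, bl)
      pvLoopA m x xs (bs', bl', rs + rl, 1)

-- best-so-far step over (start, length) runs (proof intermediate between A's loop and B's max)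
def pvStepB (m : Int) (s : Option Int × Int) (r : Int × Int) : Option Int × Int :=
  if r.2 ≥ m ∧ r.2 > s.2 then (some r.1, r.2) else s

-- the index fold of port A equals pvLoopA on the tail after the processed prefix
lemma pvFoldA_eq_loopA (m : Int) : ∀ (rest pre : List Int) (prev : Int) (bs : Option Int) (bl rs rl : Int),
    rs + rl = (pre.length : Int) + 1 →
    ((PySem.List.pyRange ((pre.length : Int) + 1) (((pre ++ prev :: rest).length : Int)) 1).foldl
        (pvStepA (pre ++ prev :: rest) m) (bs, bl, rs, rl))
      = pvLoopA m prev rest (bs, bl, rs, rl) := by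
  intro rest
  induction rest with
  | nil =>
    intro pre prev bs bl rs rl _
    simp [pvLoopA]
  | cons x xs ih =>
    intro pre prev bs bl rs rl hinv
    have hcons : PySem.List.pyRange ((pre.length : Int) + 1) (((pre ++ prev :: x :: xs).length : Int)) 1
        = ((pre.length : Int) + 1) :: PySem.List.pyRange ((pre.length : Int) + 1 + 1) (((pre ++ prev :: x :: xs).length : Int)) 1 := by
      apply PySem.List.pyRange_one_cons
      simp
    rw [hcons]
    have hget : PySem.List.pyGet? (pre ++ prev :: x :: xs) ((pre.length : Int) + 1) = some x := by
      have h2 : pre ++ prev :: x :: xs = (pre ++ [prev]) ++ x :: xs := by simp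
      have h3 : ((pre.length : Int) + 1) = (((pre ++ [prev]).length : Int)) := by simp
      rw [h2, h3]
      exact PySem.List.pyGet?_append_length (pre ++ [prev]) xs x
    have hgetp : PySem.List.pyGet? (pre ++ prev :: x :: xs) ((pre.length : Int) + 1 - 1) = some prev := by
      have h1 : ((pre.length : Int) + 1 - 1) = ((pre.length : Int)) := by ring
      rw [h1]
      exact PySem.List.pyGet?_append_length pre (x :: xs) prev
    simp only [List.foldl_cons]
    by_cases hxp : x = prev
    · have hstep : pvStepA (pre ++ prev :: x :: xs) m (bs, bl, rs, rl) ((pre.length : Int) + 1)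
          = (bs, bl, rs, rl + 1) := by
        simp only [pvStepA]
        rw [hget, hgetp]
        simp [hxp]
      rw [hstep]
      have hih := ih (pre ++ [prev]) x bs bl rs (rl + 1) (by simp; omega)
      simp only [List.append_assoc, List.cons_append, List.nil_append] at hih ⊢
      have hlen : ((pre ++ [prev]).length : Int) + 1 = (pre.length : Int) + 1 + 1 := by simp
      rw [hlen] at hih
      rw [hih]
      simp [pvLoopA, hxp]
    · have hstep : pvStepA (pre ++ prev :: x :: xs) m (bs, bl, rs, rl) ((pre.length : Int) + 1)
          = ((if rl ≥ m ∧ rl > bl then (some rs, rl) else (bs, bl)).1,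
             (if rl ≥ m ∧ rl > bl then (some rs, rl) else (bs, bl)).2,
             (pre.length : Int) + 1, (1 : Int)) := by
        simp only [pvStepA]
        rw [hget, hgetp]
        simp only [Option.getD_some, if_neg hxp]
      rw [hstep]
      have hih := ih (pre ++ [prev]) x
        ((if rl ≥ m ∧ rl > bl then (some rs, rl) else (bs, bl)).1)
        ((if rl ≥ m ∧ rl > bl then (some rs, rl) else (bs, bl)).2)
        ((pre.length : Int) + 1) 1 (by simp)
      simp only [List.append_assoc, List.cons_append, List.nil_append] at hih ⊢
      have hlen : ((pre ++ [prev]).length : Int) + 1 = (pre.length : Int) + 1 + 1 := by simp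
      rw [hlen] at hih
      rw [hih]
      have hrs : (pre.length : Int) + 1 = rs + rl := by omega
      rw [hrs]
      simp only [pvLoopA, if_neg hxp]

-- pvLoopA followed by A's final flush equals the best-so-far fold over the (start,length) runs
lemma pvLoopA_eq_foldB (m : Int) : ∀ (rest : List Int) (prev : Int) (bs : Option Int) (bl rs rl : Int),
    pvFlush m (pvLoopA m prev rest (bs, bl, rs, rl))
      = ((pvRunsAux prev rs rl rest).foldl (pvStepB m) (bs, bl)).1 := by
  intro rest
  induction rest with
  | nil =>
    intro prev bs bl rs rl
    simp only [pvLoopA, pvRunsAux, pvFlush, pvStepB, List.foldl_cons, List.foldl_nil]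
    split_ifs <;> rfl
  | cons x xs ih =>
    intro prev bs bl rs rl
    by_cases hxp : x = prev
    · simp only [pvLoopA, pvRunsAux, if_pos hxp]
      rw [ih, hxp]
    · simp only [pvLoopA, pvRunsAux, if_neg hxp, List.foldl_cons]
      rw [ih]
      by_cases hc : rl ≥ m ∧ rl > bl
      · simp [pvStepB, hc]
      · simp [pvStepB, hc]

-- B's boundary comprehension over range(1, n) equals pvBnd on the tail after the prefix
lemma pvFilter_eq_bnd : ∀ (rest pre : List Int) (prev : Int) (L : List Int), L = pre ++ prev :: rest →
    ((PySem.List.pyRange ((pre.length : Int) + 1) ((L.length : Int)) 1).filter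
        (fun i => decide ((PySem.List.pyGet? L i).getD 0 ≠ (PySem.List.pyGet? L (i - 1)).getD 0)))
      = pvBnd prev rest ((pre.length : Int) + 1) := by
  intro rest
  induction rest with
  | nil =>
    intro pre prev L hL
    subst hL
    simp [pvBnd]
  | cons x xs ih =>
    intro pre prev L hL
    have hcons : PySem.List.pyRange ((pre.length : Int) + 1) ((L.length : Int)) 1
        = ((pre.length : Int) + 1) :: PySem.List.pyRange ((pre.length : Int) + 1 + 1) ((L.length : Int)) 1 := by
      apply PySem.List.pyRange_one_cons
      subst hL; simp
    rw [hcons]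
    have hget : PySem.List.pyGet? L ((pre.length : Int) + 1) = some x := by
      subst hL
      have h2 : pre ++ prev :: x :: xs = (pre ++ [prev]) ++ x :: xs := by simp
      have h3 : ((pre.length : Int) + 1) = (((pre ++ [prev]).length : Int)) := by simp
      rw [h2, h3]
      exact PySem.List.pyGet?_append_length (pre ++ [prev]) xs x
    have hgetp : PySem.List.pyGet? L ((pre.length : Int) + 1 - 1) = some prev := by
      subst hL
      have h1 : ((pre.length : Int) + 1 - 1) = ((pre.length : Int)) := by ring
      rw [h1]
      exact PySem.List.pyGet?_append_length pre (x :: xs) prev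
    have hih := ih (pre ++ [prev]) x L (by rw [hL]; simp)
    have hlen : ((pre ++ [prev]).length : Int) + 1 = (pre.length : Int) + 1 + 1 := by simp
    rw [hlen] at hih
    rw [List.filter_cons, hget, hgetp]
    simp only [Option.getD_some]
    by_cases hxp : x = prev
    · rw [if_neg (by simp [hxp]), hih]
      simp [pvBnd, hxp]
    · rw [if_pos (by simp [hxp]), hih]
      simp [pvBnd, hxp]

-- zipping the boundary list with its tail and taking differences yields the (start,length) runs
lemma pvZip_eq_runs (rest : List Int) : ∀ (prev s0 cnt n : Int),
    n = s0 + cnt + (rest.length : Int) →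
    (((s0 :: (pvBnd prev rest (s0 + cnt) ++ [n])).zip
        ((s0 :: (pvBnd prev rest (s0 + cnt) ++ [n])).drop 1)).map (fun p => (p.1, p.2 - p.1)))
      = pvRunsAux prev s0 cnt rest := by
  induction rest with
  | nil =>
    intro prev s0 cnt n hn
    simp only [List.length_nil, Nat.cast_zero, add_zero] at hn
    simp [pvBnd, pvRunsAux]
    omega
  | cons x xs ih =>
    intro prev s0 cnt n hn
    by_cases hxp : x = prev
    · simp only [pvBnd, if_pos hxp, pvRunsAux]
      have := ih prev s0 (cnt + 1) n (by simp at hn ⊢; omega)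
      rw [← this]
      have harith : s0 + cnt + 1 = s0 + (cnt + 1) := by ring
      rw [hxp, harith]
    · simp only [pvBnd, if_neg hxp, pvRunsAux]
      have hih := ih x (s0 + cnt) 1 n (by simp at hn ⊢; omega)
      rw [← hih]
      simp only [List.cons_append, List.drop_succ_cons, List.drop_zero, List.zip_cons_cons, List.map_cons]
      congr 2
      omega

-- the best-so-far fold ignores non-qualifying runs: fold over all runs = fold over the filtered runs
lemma pvFold_filter (m : Int) : ∀ (l : List (Int × Int)) (s : Option Int × Int),
    l.foldl (pvStepB m) s = (l.filter (fun r => decide (r.2 ≥ m))).foldl (pvStepB m) s := by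
  intro l
  induction l with
  | nil => intro s; rfl
  | cons r t ih =>
    intro s
    rw [List.filter_cons]
    by_cases hq : r.2 ≥ m
    · simp only [hq, decide_true, if_true, List.foldl_cons]
      exact ih _
    · have hs : pvStepB m s r = s := by simp [pvStepB, hq]
      simp only [hq, decide_false, List.foldl_cons, hs]
      exact ih s
  -- note: `if_true`/`if_false` via decide

-- on a list of qualifying runs, the fold with a committed best equals Python's max(key) loop
lemma pvFold_max_go (m : Int) : ∀ (t : List (Int × Int)) (b : Int × Int),
    (∀ r ∈ t, m ≤ r.2) →
    ∃ c : Int × Int, PySem.List.max? (b :: t) (fun r => r.2) = some c ∧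
      (t.foldl (pvStepB m) (some b.1, b.2)) = (some c.1, c.2) := by
  intro t
  induction t with
  | nil => intro b _; exact ⟨b, by simp [PySem.List.max?], rfl⟩
  | cons x xs ih =>
    intro b hq
    have hx : m ≤ x.2 := hq x List.mem_cons_self
    have hxs : ∀ r ∈ xs, m ≤ r.2 := fun r hr => hq r (List.mem_cons_of_mem _ hr)
    by_cases hlt : b.2 < x.2
    · obtain ⟨c, hc1, hc2⟩ := ih x hxs
      refine ⟨c, ?_, ?_⟩
      · simp only [PySem.List.max?, List.foldl_cons] at hc1 ⊢
        rw [if_pos hlt]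
        exact hc1
      · have hstep : pvStepB m (some b.1, b.2) x = (some x.1, x.2) := by
          simp [pvStepB]; omega
        rw [List.foldl_cons, hstep]
        exact hc2
    · obtain ⟨c, hc1, hc2⟩ := ih b hxs
      refine ⟨c, ?_, ?_⟩
      · simp only [PySem.List.max?, List.foldl_cons] at hc1 ⊢
        rw [if_neg hlt]
        exact hc1
      · have hstep : pvStepB m (some b.1, b.2) x = (some b.1, b.2) := by
          simp only [pvStepB]
          rw [if_neg]; omega
        rw [List.foldl_cons, hstep]
        exact hc2

-- starting from (None, 0), the fold over qualifying positive-length runs computes max(key=len).1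
lemma pvFold_eq_max (m : Int) (q : List (Int × Int))
    (hq : ∀ r ∈ q, m ≤ r.2 ∧ 1 ≤ r.2) :
    (q.foldl (pvStepB m) (none, 0)).1 = (PySem.List.max? q (fun r => r.2)).map (·.1) := by
  cases q with
  | nil => rfl
  | cons x xs =>
    have hx := hq x List.mem_cons_self
    have hxs : ∀ r ∈ xs, m ≤ r.2 := fun r hr => (hq r (List.mem_cons_of_mem _ hr)).1
    have hstep : pvStepB m (none, 0) x = (some x.1, x.2) := by
      simp only [pvStepB]
      rw [if_pos]; omega
    obtain ⟨c, hc1, hc2⟩ := pvFold_max_go m xs x hxs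
    rw [List.foldl_cons, hstep, hc2, hc1]
    rfl

-- every run produced by pvRunsAux has length ≥ 1 (when the running count starts ≥ 1)
lemma pvRuns_len_pos : ∀ (rest : List Int) (prev s cnt : Int), 1 ≤ cnt →
    ∀ r ∈ pvRunsAux prev s cnt rest, 1 ≤ r.2 := by
  intro rest
  induction rest with
  | nil =>
    intro prev s cnt hc r hr
    simp [pvRunsAux] at hr
    subst hr; exact hc
  | cons x xs ih =>
    intro prev s cnt hc r hr
    by_cases hxp : x = prev
    · simp only [pvRunsAux, if_pos hxp] at hr
      exact ih prev s (cnt + 1) (by omega) r hr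
    · simp only [pvRunsAux, if_neg hxp, List.mem_cons] at hr
      rcases hr with h | h
      · subst h; exact hc
      · exact ih x (s + cnt) 1 (by omega) r h

-- zeta-expanded form of port B (proof convenience; equal by definitional unfolding)
lemma pvAlt_eq (e : List Int) (m : Int) :
    detect_loop_point_py_alt e m =
      (if (e.length : Int) < m + 2 then none
       else
         match PySem.List.max?
             ((((0 :: ((List.filter
                 (fun i => decide ((PySem.List.pyGet? e i).getD 0 ≠ (PySem.List.pyGet? e (i - 1)).getD 0))
                 (PySem.List.pyRange 1 (e.length : Int) 1)) ++ [((e.length : Int))])).zip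
               ((0 :: ((List.filter
                 (fun i => decide ((PySem.List.pyGet? e i).getD 0 ≠ (PySem.List.pyGet? e (i - 1)).getD 0))
                 (PySem.List.pyRange 1 (e.length : Int) 1)) ++ [((e.length : Int))])).drop 1)).map
               (fun p => (p.1, p.2 - p.1))).filter (fun r => decide (r.2 ≥ m)))
             (fun r => r.2) with
         | none => none
         | some b => some b.1) := rfl

-- main equality on a nonempty envelope
theorem pv_main (e0 : Int) (etail : List Int) (m : Int) :
    detect_loop_point_py (e0 :: etail) m = detect_loop_point_py_alt (e0 :: etail) m := by
  unfold detect_loop_point_py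
  rw [pvAlt_eq]
  split_ifs with hg
  · rfl
  · have hA := pvFoldA_eq_loopA m etail [] e0 none 0 0 1 (by simp)
    simp only [List.nil_append, List.length_nil, Nat.cast_zero, zero_add] at hA
    rw [hA, pvLoopA_eq_foldB]
    have hB := pvFilter_eq_bnd etail [] e0 (e0 :: etail) rfl
    simp only [List.length_nil, Nat.cast_zero, zero_add] at hB
    rw [hB]
    have hZ := pvZip_eq_runs etail e0 0 1 (((e0 :: etail).length : Int)) (by simp; omega)
    simp only [zero_add] at hZ
    rw [hZ]
    rw [pvFold_filter]
    have hlen : ∀ r ∈ (pvRunsAux e0 0 1 etail).filter (fun r => decide (r.2 ≥ m)),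
        m ≤ r.2 ∧ 1 ≤ r.2 := by
      intro r hr
      rw [List.mem_filter] at hr
      refine ⟨by simpa using hr.2, pvRuns_len_pos etail e0 0 1 (by omega) r hr.1⟩
    rw [pvFold_eq_max m _ hlen]
    cases PySem.List.max? ((pvRunsAux e0 0 1 etail).filter (fun r => decide (r.2 ≥ m))) (fun r => r.2) with
    | none => rfl
    | some b => rfl

-- ===== VERDICT (by name: the statement is the Claim_ definition above) =====
theorem detect_loop_point_py_spec : Claim_equal_detect_loop_point_py := by
  intro envelope min_sustain _
  unfold Spec_detect_loop_point_py
  cases envelope with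
  | nil =>
    by_cases hm : (0 : Int) < min_sustain + 2
    · simp [detect_loop_point_py, detect_loop_point_py_alt, hm]
    · have hms : min_sustain ≤ -2 := by omega
      simp only [detect_loop_point_py, detect_loop_point_py_alt]
      rw [if_neg (by simpa using hm), if_neg (by simpa using hm)]
      have hr : PySem.List.pyRange 1 ((([] : List Int).length : Int)) 1 = [] := by simp
      rw [hr]
      simp only [List.foldl_nil, List.filter_nil, List.nil_append, pvFlush]
      rw [if_pos ⟨by omega, by omega⟩]
      simp [PySem.List.max?, show (0 : Int) ≥ min_sustain by omega]
  | cons e0 etail => exact pv_main e0 etail min_sustain
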